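-- pv_equiv track=rewrite | github.com/lanl/T-ELF | TELF/pre_processing/Beaver/beaver.py | __get_ngrams_helper
-- ===== SOURCE A (Python) =====
-- def __get_ngrams_helper(text, n):
--     ngrams = []
--     tokens = text.split()
--     num_tokens = len(tokens)
--     for index in range(num_tokens):
--         ngram = []
--         for i in range(n):
--
--             # build ngram
--             if index + i < num_tokens:
--                 ngram.append(tokens[index+i])
--
--             # test ngram
--             len_ngram = len([x for y in ngram for x in y.split('-')])
--             if len_ngram == n:
--                 ngrams.append(' '.join(ngram))
--                 break
--             elif len_ngram < n:
--                 continue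
--             else:
--                 break
--
--     return ngrams
-- ===== SOURCE B (Python) =====
-- def __get_ngrams_helper(text, n):
--     # One pass per start position with a running piece count: each token's
--     # hyphen-piece count is computed once, instead of re-splitting and
--     # re-flattening the growing ngram at every inner step.
--     tokens = text.split()
--     pieces = [len(t.split('-')) for t in tokens]
--     num_tokens = len(tokens)
--     ngrams = []
--     for start in range(num_tokens):
--         total = 0
--         for end in range(start, num_tokens):
--             total += pieces[end]
--             if total >= n:
--                 if total == n:
--                     ngrams.append(' '.join(tokens[start:end + 1]))
--                 break
--     return ngrams
-- ===== Notes on version B (the rewrite author's own statement) =====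
-- stated objective: faster
-- what changed: Each token's hyphen-piece count is computed once and a running total is kept per start position, instead of re-splitting and re-flattening the entire growing ngram at every inner step.
import Mathlib
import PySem

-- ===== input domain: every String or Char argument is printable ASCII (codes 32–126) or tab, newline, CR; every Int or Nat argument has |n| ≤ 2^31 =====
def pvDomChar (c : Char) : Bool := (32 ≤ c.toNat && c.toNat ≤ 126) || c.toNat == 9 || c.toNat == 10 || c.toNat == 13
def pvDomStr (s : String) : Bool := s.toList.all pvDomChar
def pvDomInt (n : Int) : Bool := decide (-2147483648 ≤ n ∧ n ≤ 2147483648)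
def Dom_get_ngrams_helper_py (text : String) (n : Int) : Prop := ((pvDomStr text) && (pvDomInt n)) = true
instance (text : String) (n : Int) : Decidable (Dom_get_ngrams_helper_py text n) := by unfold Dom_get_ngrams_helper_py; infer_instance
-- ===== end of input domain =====

-- B computes each token's hyphen-piece count once and keeps a running total per start
-- position, instead of re-splitting and re-flattening the whole growing ngram at every
-- inner step as A does; a timing run measures whether this is faster.


-- ===== PORT A =====
-- inner 'for i in range(n)' loop of A, with break/continue as early returns;
-- y.split('-'): the separator is the nonempty literal "-", so split? is always `some` and `.getD []` is exact
def pyA_inner (tokens : List String) (numTokens n index : Int) :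
    List Int → List String → Option String
  | [], _ => none
  | i :: rest, ngram =>
    let ngram' := if index + i < numTokens
                  then ngram ++ [PySem.List.pyGetD tokens (index + i) ""]
                  else ngram
    let len_ngram : Int :=
      (((ngram'.map (fun y => (PySem.Str.split? y "-").getD [])).flatten).length : Int)
    if len_ngram = n then some (PySem.Str.join " " ngram')
    else if len_ngram < n then pyA_inner tokens numTokens n index rest ngram'
    else none

def get_ngrams_helper_py (text : String) (n : Int) : List String :=
  let tokens := PySem.Str.split₀ text
  let num_tokens : Int := (tokens.length : Int)
  (PySem.List.pyRange 0 num_tokens 1).foldl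
    (fun ngrams index =>
      match pyA_inner tokens num_tokens n index (PySem.List.pyRange 0 n 1) [] with
      | some g => ngrams ++ [g]
      | none => ngrams) []

-- ===== PORT B =====
-- inner loop of B: running total of precomputed piece counts over the suffix, break once total >= n
def pyB_inner (n : Int) : List (String × Int) → Int → List String → Option String
  | [], _, _ => none
  | (t, p) :: rest, total, taken =>
    let total' := total + p
    let taken' := taken ++ [t]
    if n ≤ total' then (if total' = n then some (PySem.Str.join " " taken') else none)
    else pyB_inner n rest total' taken'

-- outer loop of B over the start positions = the suffixes of the (token, piece-count) list
def pyB_outer (n : Int) : List (String × Int) → List String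
  | [] => []
  | pr :: rest =>
    (match pyB_inner n (pr :: rest) 0 [] with
     | some g => [g]
     | none => []) ++ pyB_outer n rest

def get_ngrams_helper_py_alt (text : String) (n : Int) : List String :=
  let tokens := PySem.Str.split₀ text
  let pairs := tokens.map (fun t => (t, ((((PySem.Str.split? t "-").getD []).length : Nat) : Int)))
  pyB_outer n pairs

-- ===== PRECONDITION & SPEC =====
def Spec_get_ngrams_helper_py (text : String) (n : Int) (out : List String) : Prop := out = get_ngrams_helper_py_alt text n
instance (text : String) (n : Int) (out : List String) : Decidable (Spec_get_ngrams_helper_py text n out) := by unfold Spec_get_ngrams_helper_py; infer_instance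

-- ===== CLAIM (what is proved, stated in full; the proofs are below) =====
def Claim_equal_get_ngrams_helper_py : Prop := ∀ (text : String) (n : Int), Dom_get_ngrams_helper_py text n → Spec_get_ngrams_helper_py text n (get_ngrams_helper_py text n)

-- ===== LEMMAS AND PROOFS =====

-- number of hyphen pieces of one token (what B precomputes per token)
def pvPc (t : String) : Nat := ((PySem.Str.split? t "-").getD []).length

-- the quantity A recomputes at every inner step
def pvLenflat (g : List String) : Nat :=
  ((g.map (fun y => (PySem.Str.split? y "-").getD [])).flatten).length

lemma pvGo_len (sep : List Char) :
    ∀ (fuel : Nat) (l cur : List Char) (acc : List (List Char)),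
      1 ≤ (PySem.Chars.splitOn.go sep fuel l cur acc).length := by
  intro fuel
  induction fuel with
  | zero => intro l cur acc; rw [PySem.Chars.splitOn.go.eq_def]; simp
  | succ f ih =>
    intro l cur acc
    rw [PySem.Chars.splitOn.go.eq_def]
    cases l with
    | nil => simp
    | cons c rest =>
      simp only []
      split
      · exact ih _ _ _
      · exact ih _ _ _

lemma pvPc_pos (t : String) : 1 ≤ pvPc t := by
  simp only [pvPc, PySem.Str.split?.eq_1]
  have h : PySem.Chars.split? t.toList "-".toList
      = some (PySem.Chars.splitOn t.toList "-".toList) := by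
    simp [PySem.Chars.split?]
  rw [h]
  simp only [Option.map_some, Option.getD_some, List.length_map]
  exact pvGo_len _ _ _ _ _

lemma pvLenflat_append (g : List String) (t : String) :
    pvLenflat (g ++ [t]) = pvLenflat g + pvPc t := by
  simp [pvLenflat, pvPc]

-- once the token indices run past the end, A's ngram stops growing and the inner loop falls through to none
lemma pvA_exhaust (toks : List String) (n index : Int) :
    ∀ (rs : List Int) (g : List String),
      (∀ i ∈ rs, ¬ (index + i < (toks.length : Int))) →
      ((pvLenflat g : Int) < n) →
      pyA_inner toks (toks.length : Int) n index rs g = none := by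
  intro rs
  induction rs with
  | nil => intro g _ _; simp [pyA_inner]
  | cons i rest ih =>
    intro g hout hlt
    have hi : ¬ (index + i < (toks.length : Int)) := hout i (List.mem_cons_self)
    simp only [pyA_inner, if_neg hi]
    have hflat : (((g.map (fun y => (PySem.Str.split? y "-").getD [])).flatten).length : Int)
        = (pvLenflat g : Int) := by simp [pvLenflat]
    rw [hflat, if_neg (by omega), if_pos hlt]
    exact ih g (fun j hj => hout j (List.mem_cons_of_mem _ hj)) hlt

-- main inner-loop correspondence: A's loop from range position j with accumulated ngram g
-- equals B's running-total scan of the remaining token suffix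
lemma pvInner_eq (toks : List String) (n : Int) (s : Nat) :
    ∀ (d j : Nat) (g : List String),
      toks.length ≤ s + j + d →
      j ≤ pvLenflat g →
      (pvLenflat g : Int) < n →
      pyA_inner toks (toks.length : Int) n (s : Int) (PySem.List.pyRange (j : Int) n 1) g
        = pyB_inner n ((toks.drop (s + j)).map (fun t => (t, (pvPc t : Int)))) (pvLenflat g : Int) g := by
  intro d
  induction d with
  | zero =>
    intro j g hd hj hlt
    have hge : toks.length ≤ s + j := by omega
    rw [List.drop_eq_nil_of_le hge]
    simp only [List.map_nil, pyB_inner]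
    apply pvA_exhaust
    · intro i hi
      have := (PySem.List.mem_pyRange_one (a := (j : Int)) (b := n) (x := i)).mp hi
      omega
    · exact hlt
  | succ d ih =>
    intro j g hd hj hlt
    by_cases hin : s + j < toks.length
    · -- one real step: consume token toks[s+j]
      have hjn : (j : Int) < n := by omega
      rw [PySem.List.pyRange_one_cons hjn]
      have hcast : (s : Int) + (j : Int) = ((s + j : Nat) : Int) := by push_cast; ring
      have hguard : (s : Int) + (j : Int) < (toks.length : Int) := by exact_mod_cast (by omega : ((s+j : Nat) : Int) < (toks.length : Int)) -- placeholder
      simp only [pyA_inner, if_pos hguard]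
      rw [hcast, PySem.List.pyGetD_natCast, List.getD_eq_getElem toks "" hin]
      rw [← List.getElem_cons_drop hin]
      simp only [List.map_cons, pyB_inner]
      have hflat : (((((g ++ [toks[s+j]])).map (fun y => (PySem.Str.split? y "-").getD [])).flatten).length : Int)
          = (pvLenflat g : Int) + (pvPc toks[s+j] : Int) := by
        have := pvLenflat_append g toks[s+j]
        simp only [pvLenflat] at this ⊢
        push_cast [this]; ring
      rw [hflat]
      have hp1 : 1 ≤ pvPc toks[s+j] := pvPc_pos _
      by_cases he : (pvLenflat g : Int) + (pvPc toks[s+j] : Int) = n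
      · rw [if_pos he, if_pos (by omega), if_pos he]
      · rw [if_neg he]
        by_cases hl : (pvLenflat g : Int) + (pvPc toks[s+j] : Int) < n
        · rw [if_pos hl, if_neg (by omega)]
          have hrec := ih (j + 1) (g ++ [toks[s+j]])
            (by omega)
            (by rw [pvLenflat_append]; omega)
            (by rw [pvLenflat_append]; push_cast; omega)
          have hc1 : ((j : Int) + 1) = (((j + 1 : Nat)) : Int) := by push_cast; ring
          have hc2 : s + (j + 1) = s + j + 1 := by omega
          rw [hc1, hrec, hc2, pvLenflat_append]
          push_cast; ring_nf
        · rw [if_neg hl, if_pos (by omega), if_neg he]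
    · -- tokens exhausted
      have hge : toks.length ≤ s + j := by omega
      rw [List.drop_eq_nil_of_le hge]
      simp only [List.map_nil, pyB_inner]
      apply pvA_exhaust
      · intro i hi
        have := (PySem.List.mem_pyRange_one (a := (j : Int)) (b := n) (x := i)).mp hi
        omega
      · exact hlt

-- outer loops: A's fold over the remaining start indices equals B's recursion over the remaining suffixes
lemma pvOuter_eq (toks : List String) (n : Int) (hn : 0 < n) :
    ∀ (d k : Nat) (acc : List String),
      toks.length ≤ k + d →
      (PySem.List.pyRange (k : Int) (toks.length : Int) 1).foldl
        (fun ngrams index =>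
          match pyA_inner toks (toks.length : Int) n index (PySem.List.pyRange 0 n 1) [] with
          | some g => ngrams ++ [g]
          | none => ngrams) acc
      = acc ++ pyB_outer n ((toks.drop k).map (fun t => (t, (pvPc t : Int)))) := by
  intro d
  induction d with
  | zero =>
    intro k acc hd
    have hge : toks.length ≤ k := by omega
    have hnil : PySem.List.pyRange (k : Int) (toks.length : Int) 1 = [] := by
      simp [PySem.List.pyRange]; omega
    rw [hnil, List.drop_eq_nil_of_le hge]
    simp [pyB_outer]
  | succ d ih =>
    intro k acc hd
    by_cases hin : k < toks.length
    · have hklt : (k : Int) < (toks.length : Int) := by exact_mod_cast hin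
      rw [PySem.List.pyRange_one_cons hklt]
      simp only [List.foldl_cons]
      have hinner := pvInner_eq toks n k toks.length 0 []
        (by omega) (by simp [pvLenflat]) (by simp [pvLenflat]; omega)
      have h0 : ((0 : Nat) : Int) = (0 : Int) := by norm_num
      rw [h0] at hinner
      have hz : (pvLenflat [] : Int) = 0 := by simp [pvLenflat]
      rw [hz] at hinner
      have hk0 : k + 0 = k := by omega
      rw [hk0] at hinner
      rw [← List.getElem_cons_drop hin] at hinner
      rw [hinner]
      rw [← List.getElem_cons_drop hin]
      simp only [List.map_cons, pyB_outer]
      have hc : ((k : Int) + 1) = (((k + 1 : Nat)) : Int) := by push_cast; ring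
      rw [hc]
      cases hB : pyB_inner n
          ((toks[k], (pvPc toks[k] : Int)) ::
            (toks.drop (k+1)).map (fun t => (t, (pvPc t : Int)))) 0 [] with
      | none =>
        rw [ih (k + 1) acc (by omega)]
        simp
      | some g =>
        rw [ih (k + 1) (acc ++ [g]) (by omega)]
        simp
    · have hge : toks.length ≤ k := by omega
      have hnil : PySem.List.pyRange (k : Int) (toks.length : Int) 1 = [] := by
        simp [PySem.List.pyRange]; omega
      rw [hnil, List.drop_eq_nil_of_le hge]
      simp [pyB_outer]

-- n ≤ 0: A's inner range is empty, so the fold never appends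
lemma pvA_nonpos (toks : List String) (n : Int) (hn : n ≤ 0) :
    ∀ (rs : List Int) (acc : List String),
      rs.foldl
        (fun ngrams index =>
          match pyA_inner toks (toks.length : Int) n index (PySem.List.pyRange 0 n 1) [] with
          | some g => ngrams ++ [g]
          | none => ngrams) acc = acc := by
  have hr : PySem.List.pyRange 0 n 1 = [] := by simp [PySem.List.pyRange]; omega
  intro rs acc
  apply List.foldl_fixed'
  intro i
  rw [hr]
  rfl

-- n ≤ 0: B breaks on the first token of every suffix without appending
lemma pvB_nonpos (n : Int) (hn : n ≤ 0) :
    ∀ (l : List (String × Int)), (∀ pr ∈ l, 1 ≤ pr.2) → pyB_outer n l = [] := by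
  intro l
  induction l with
  | nil => intro _; simp [pyB_outer]
  | cons pr rest ih =>
    intro h1
    obtain ⟨t, p⟩ := pr
    have hp : 1 ≤ p := h1 (t, p) List.mem_cons_self
    simp only [pyB_outer, pyB_inner]
    rw [if_pos (by omega), if_neg (by omega)]
    simp only [List.nil_append]
    exact ih (fun q hq => h1 q (List.mem_cons_of_mem _ hq))

-- ===== VERDICT (by name: the statement is the Claim_ definition above) =====
theorem get_ngrams_helper_py_spec : Claim_equal_get_ngrams_helper_py := by
  intro text n _
  unfold Spec_get_ngrams_helper_py get_ngrams_helper_py get_ngrams_helper_py_alt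
  simp only []
  by_cases hn : n ≤ 0
  · rw [pvA_nonpos (PySem.Str.split₀ text) n hn]
    rw [pvB_nonpos n hn _ (by
      intro pr hpr
      simp only [List.mem_map] at hpr
      obtain ⟨t, _, rfl⟩ := hpr
      have h1 := pvPc_pos t
      simp only [pvPc] at h1
      show (1 : Int) ≤ ((((PySem.Str.split? t "-").getD []).length : Nat) : Int)
      exact_mod_cast h1)]
  · have hn' : 0 < n := by omega
    have := pvOuter_eq (PySem.Str.split₀ text) n hn' (PySem.Str.split₀ text).length 0 []
      (by omega)
    have h0 : ((0 : Nat) : Int) = (0 : Int) := by norm_num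
    rw [h0] at this
    rw [this]
    simp [pvPc]
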